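-- pv_equiv track=rewrite | github.com/CarlSchader/markov-chain | markovChain.py | makeChainPlus
-- ===== SOURCE A (Python) =====
-- def makeChainPlus(inputList, maxDepth):
-- 	chain = {}
-- 	for index in range(1, len(inputList)):
-- 		for depth in range(1, maxDepth+1):
-- 			if index >= depth:
-- 				key = tuple(inputList[index-depth:index])
-- 				if key in chain:
-- 					if inputList[index] in chain[key]:
-- 						chain[key][inputList[index]] += 1
-- 					else:
-- 						chain[key][inputList[index]] = 1
-- 				else:
-- 					chain[key] = {inputList[index]: 1}
-- 	return chain
-- ===== SOURCE B (Python) =====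
-- def makeChainPlus(inputList, maxDepth):
-- 	# Group-by/count: materialise the (prefix, next) event stream once, group the
-- 	# successors per prefix, then build the result purely -- each inner dict is a
-- 	# comprehension counting a finished group with list.count (no incremental
-- 	# counting while scanning, as A does).
-- 	events = [(tuple(inputList[index-depth:index]), inputList[index])
-- 	          for index in range(1, len(inputList))
-- 	          for depth in range(1, maxDepth+1) if index >= depth]
-- 	groups = {}
-- 	for key, nxt in events:
-- 		groups.setdefault(key, []).append(nxt)
-- 	return {key: {x: g.count(x) for x in dict.fromkeys(g)} for key, g in groups.items()}
-- ===== Notes on version B (the rewrite author's own statement) =====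
-- stated objective: alternative
-- what changed: A accumulates counts by mutating nested dicts incrementally while scanning; B is a group-by/count algorithm: it materialises the (prefix, next) event stream once, groups the successors per prefix, and then builds each inner dict purely by counting the finished group with list.count.
import Mathlib
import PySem

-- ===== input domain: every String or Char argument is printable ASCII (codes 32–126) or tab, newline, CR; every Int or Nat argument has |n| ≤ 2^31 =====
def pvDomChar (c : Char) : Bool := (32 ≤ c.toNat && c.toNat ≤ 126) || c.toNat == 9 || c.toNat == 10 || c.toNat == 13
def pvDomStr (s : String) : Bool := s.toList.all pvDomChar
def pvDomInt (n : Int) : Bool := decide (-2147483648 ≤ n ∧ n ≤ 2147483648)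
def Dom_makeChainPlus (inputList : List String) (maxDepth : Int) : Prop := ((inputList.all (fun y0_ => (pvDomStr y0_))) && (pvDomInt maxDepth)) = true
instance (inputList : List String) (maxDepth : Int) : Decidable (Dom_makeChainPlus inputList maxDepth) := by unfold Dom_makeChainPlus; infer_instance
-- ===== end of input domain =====

-- B replaces A's incremental nested-dict counting by a group-by/count algorithm over a
-- materialised event stream (objective: alternative, not faster).

-- ===== PORT A =====
-- A's loop body: the nested-dict update on chain for one (key, next) pair
def mcpStepA (chain : PySem.Dict (List String) (PySem.Dict String Int))
    (key : List String) (nxt : String) : PySem.Dict (List String) (PySem.Dict String Int) :=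
  if chain.contains key then
    let inner := chain.getD key PySem.Dict.empty
    if inner.contains nxt then chain.insert key (inner.insert nxt (inner.getD nxt 0 + 1))
    else chain.insert key (inner.insert nxt 1)
  else chain.insert key (PySem.Dict.empty.insert nxt 1)

def makeChainPlus (inputList : List String) (maxDepth : Int) :
    List (List String × List (String × Int)) :=
  ((PySem.List.pyRange 1 (inputList.length : Int) 1).foldl (fun chain index =>
      (PySem.List.pyRange 1 (maxDepth + 1) 1).foldl (fun chain depth =>
        if index ≥ depth then
          mcpStepA chain (PySem.List.slice inputList (some (index - depth)) (some index))
            (PySem.List.pyGetD inputList index "")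
        else chain) chain)
    PySem.Dict.empty).items.map (fun q => (q.1, q.2.items))

-- ===== PORT B =====
-- B's event-stream comprehension: all (prefix, next) pairs in loop order
def mcpEvents (L : List String) (M : Int) : List (List String × String) :=
  (PySem.List.pyRange 1 (L.length : Int) 1).flatMap (fun index =>
    ((PySem.List.pyRange 1 (M + 1) 1).filter (fun depth => decide (index ≥ depth))).map
      (fun depth => (PySem.List.slice L (some (index - depth)) (some index),
                     PySem.List.pyGetD L index "")))

def makeChainPlus_alt (inputList : List String) (maxDepth : Int) :
    List (List String × List (String × Int)) :=
  let events := mcpEvents inputList maxDepth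
  let groups := events.foldl (fun d p => d.modify p.1 [] (fun g => g ++ [p.2])) PySem.Dict.empty
  (groups.items.foldl (fun chain q =>
      chain.insert q.1
        ((PySem.List.dedup q.2).foldl (fun d x => d.insert x (q.2.count x : Int))
          PySem.Dict.empty))
    PySem.Dict.empty).items.map (fun q => (q.1, q.2.items))

-- ===== PRECONDITION & SPEC =====
def Spec_makeChainPlus (inputList : List String) (maxDepth : Int) (out : List (List String × List (String × Int))) : Prop := out = makeChainPlus_alt inputList maxDepth
instance (inputList : List String) (maxDepth : Int) (out : List (List String × List (String × Int))) : Decidable (Spec_makeChainPlus inputList maxDepth out) := by unfold Spec_makeChainPlus; infer_instance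

-- ===== CLAIM (what is proved, stated in full; the proofs are below) =====
def Claim_equal_makeChainPlus : Prop := ∀ (inputList : List String) (maxDepth : Int), Dom_makeChainPlus inputList maxDepth → Spec_makeChainPlus inputList maxDepth (makeChainPlus inputList maxDepth)

-- ===== LEMMAS AND PROOFS =====

-- "d[x] = d.get(x, 0) + 1" in one step
def mcpUpd (d : PySem.Dict String Int) (x : String) : PySem.Dict String Int :=
  d.insert x (d.getD x 0 + 1)

theorem mcpStepA_eq (chain : PySem.Dict (List String) (PySem.Dict String Int))
    (key : List String) (nxt : String) :
    mcpStepA chain key nxt =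
      chain.insert key (mcpUpd (chain.getD key PySem.Dict.empty) nxt) := by
  unfold mcpStepA mcpUpd
  by_cases hk : chain.contains key = true
  · simp only [hk, if_true]
    by_cases hn : (chain.getD key PySem.Dict.empty).contains nxt = true
    · simp [hn]
    · simp [hn, PySem.Dict.getD_of_not_contains _ _ (by simpa using hn)]
  · simp [hk, PySem.Dict.getD_of_not_contains _ _ (by simpa using hk)]

-- the nested index/depth loops of A process exactly the event stream, in order
theorem mcpLoop {σ : Type} (L : List String) (M : Int)
    (g : σ → List String → String → σ) (init : σ) :
    (PySem.List.pyRange 1 (L.length : Int) 1).foldl (fun s index =>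
      (PySem.List.pyRange 1 (M + 1) 1).foldl (fun s depth =>
        if index ≥ depth then
          g s (PySem.List.slice L (some (index - depth)) (some index))
            (PySem.List.pyGetD L index "")
        else s) s) init
    = (mcpEvents L M).foldl (fun s p => g s p.1 p.2) init := by
  unfold mcpEvents
  induction (PySem.List.pyRange 1 (L.length : Int) 1) generalizing init with
  | nil => rfl
  | cons i rest ih =>
    simp only [List.foldl_cons, List.flatMap_cons, List.foldl_append, ih]
    congr 1
    rw [List.foldl_map, List.foldl_filter]
    simp

-- getD of A's fold at one key is the fold of inner updates over that key's events
theorem mcpGetD (E : List (List String × String))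
    (d : PySem.Dict (List String) (PySem.Dict String Int)) (k : List String) :
    (E.foldl (fun chain p => chain.insert p.1 (mcpUpd (chain.getD p.1 PySem.Dict.empty) p.2)) d).getD
        k PySem.Dict.empty
      = ((E.filter (fun p => p.1 == k)).map (·.2)).foldl mcpUpd
          (d.getD k PySem.Dict.empty) := by
  induction E generalizing d with
  | nil => rfl
  | cons p rest ih =>
    simp only [List.foldl_cons, List.filter_cons]
    by_cases h : p.1 = k
    · subst h
      simp [ih, PySem.Dict.getD_insert_self]
    · rw [ih]
      have : (p.1 == k) = false := by simpa using h
      simp [this, PySem.Dict.getD_insert_of_ne _ _ _ (Ne.symm h)]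

-- instantiation of items_foldl_insert_fresh for B's fresh-key build folds from an empty dict
theorem mcpFresh {κ ν : Type} [BEq κ] [LawfulBEq κ] (l : List κ) (v : κ → ν) (hl : l.Nodup) :
    (l.foldl (fun d a => d.insert a (v a)) PySem.Dict.empty).items = l.map (fun a => (a, v a)) := by
  simpa using PySem.Dict.items_foldl_insert_fresh l (fun a => a) v PySem.Dict.empty (by simp)
    (by simpa)

-- ===== VERDICT (by name: the statement is the Claim_ definition above) =====
theorem makeChainPlus_spec : Claim_equal_makeChainPlus := by
  intro L M _
  unfold Spec_makeChainPlus makeChainPlus makeChainPlus_alt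
  rw [mcpLoop L M mcpStepA]
  have hstep : (fun (s : PySem.Dict (List String) (PySem.Dict String Int)) (p : List String × String) => mcpStepA s p.1 p.2)
      = fun s p => s.insert p.1 (mcpUpd (s.getD p.1 PySem.Dict.empty) p.2) := by
    funext s p; exact mcpStepA_eq s p.1 p.2
  rw [hstep]
  -- A side: items as a map over the deduplicated key stream
  have hnd := PySem.Dict.nodup_keys_foldl_insert_key (mcpEvents L M) (fun p => p.1)
      (fun d p => mcpUpd (d.getD p.1 PySem.Dict.empty) p.2) PySem.Dict.empty (by simp)
  rw [PySem.Dict.items_eq_map_keys _ hnd PySem.Dict.empty,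
      PySem.Dict.keys_foldl_insert_key (mcpEvents L M) (fun p => p.1)
        (fun d p => mcpUpd (d.getD p.1 PySem.Dict.empty) p.2) PySem.Dict.empty]
  simp only [PySem.Dict.keys_empty, PySem.Set.update_nil_left]
  -- B side: the grouping dict has the same deduplicated keys, its values the grouped successors
  have hgnd : ((mcpEvents L M).foldl (fun d p => d.modify p.1 [] (fun g => g ++ [p.2]))
      PySem.Dict.empty).keys.Nodup :=
    PySem.Dict.nodup_keys_foldl_modify_key (mcpEvents L M) (fun p => p.1) []
      (fun _ p g => g ++ [p.2]) PySem.Dict.empty (by simp)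
  have hB :
      (((mcpEvents L M).foldl (fun d p => d.modify p.1 [] (fun g => g ++ [p.2]))
          PySem.Dict.empty).items.foldl (fun chain q =>
            chain.insert q.1
              ((PySem.List.dedup q.2).foldl (fun d x => d.insert x ((q.2.count x : Int)))
                PySem.Dict.empty))
          PySem.Dict.empty).items
      = PySem.Dict.empty.items ++
          ((mcpEvents L M).foldl (fun d p => d.modify p.1 [] (fun g => g ++ [p.2]))
            PySem.Dict.empty).items.map (fun q =>
              (q.1, (PySem.List.dedup q.2).foldl (fun d x => d.insert x ((q.2.count x : Int)))
                PySem.Dict.empty)) :=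
    PySem.Dict.items_foldl_insert_fresh _ _ _ _ (by simp)
      (by simpa only [PySem.Dict.keys] using hgnd)
  rw [hB,
      PySem.Dict.items_eq_map_keys _ hgnd ([] : List String),
      PySem.Dict.keys_foldl_modify_key (mcpEvents L M) (fun p => p.1) []
        (fun _ p g => g ++ [p.2]) PySem.Dict.empty]
  simp only [PySem.Dict.keys_empty, PySem.Set.update_nil_left,
    show (PySem.Dict.empty : PySem.Dict (List String) (PySem.Dict String Int)).items = []
      from rfl, List.nil_append, List.map_map]
  refine List.map_congr_left ?_
  intro k hk
  simp only [Function.comp]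
  rw [mcpGetD, PySem.Dict.getD_foldl_modify_append]
  simp only [PySem.Dict.getD_empty, List.nil_append]
  unfold mcpUpd
  rw [PySem.Dict.foldl_insert_getD_add_one_eq_counter, PySem.Dict.items_counter]
  simp only [PySem.List.dedup_eq_ofList]
  rw [mcpFresh _ _ (PySem.Set.nodup_ofList _)]
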